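-- pv_equiv track=rewrite | github.com/drizzt5/Python | class/Quiz/Quiz2/Submitted/CS3023_Quiz2_Glasser.py | distribute
-- ===== SOURCE A (Python) =====
-- def distribute(S):
--     gd = {}
--     gd['A'] = []
--     gd['B'] = []
--     gd['C'] = []
--     gd['D'] = []
--     gd['F'] = []
--     for item in S.items():
--         if item[1] == ['A']:
--             gd['A'].append(item[0])
--         elif item[1] == ['B']:
--             gd['B'].append(item[0])
--         elif item[1] == ['C']:
--             gd['C'].append(item[0])
--         elif item[1] == ['D']:
--             gd['D'].append(item[0])
--         elif item[1] == ['F']: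
--             gd['F'].append(item[0])
--
--     return gd
-- ===== SOURCE B (Python) =====
-- def distribute(S):
--     return {g: [k for k, v in S.items() if v == [g]] for g in 'ABCDF'}
-- ===== Notes on version B (the rewrite author's own statement) =====
-- stated objective: idiomatic
-- what changed: Replaces the single-pass if/elif dispatch that mutates five pre-made buckets with a dict comprehension over the grade letters that filters S once per grade.
import Mathlib
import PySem

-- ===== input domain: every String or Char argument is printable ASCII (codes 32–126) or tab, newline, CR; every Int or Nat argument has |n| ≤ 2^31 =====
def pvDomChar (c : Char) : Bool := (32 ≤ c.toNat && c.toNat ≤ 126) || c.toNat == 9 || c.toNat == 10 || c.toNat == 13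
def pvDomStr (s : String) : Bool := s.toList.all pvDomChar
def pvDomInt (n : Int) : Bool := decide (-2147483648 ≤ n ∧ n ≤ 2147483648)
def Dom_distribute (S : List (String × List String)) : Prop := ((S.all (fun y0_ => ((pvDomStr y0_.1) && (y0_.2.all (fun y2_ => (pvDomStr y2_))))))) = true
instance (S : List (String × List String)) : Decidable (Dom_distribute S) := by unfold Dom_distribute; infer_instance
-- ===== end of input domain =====

-- B replaces A's single-pass if/elif bucket mutation with a comprehension over the five grades, filtering S per grade (idiomatic).

-- ===== PORT A =====
-- the loop body of A's for-loop: the if/elif chain appending item[0] to the matching bucket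
def distStep (gd : PySem.Dict String (List String)) (item : String × List String) : PySem.Dict String (List String) :=
  if item.2 == ["A"] then gd.modify "A" [] (fun l => l ++ [item.1])
  else if item.2 == ["B"] then gd.modify "B" [] (fun l => l ++ [item.1])
  else if item.2 == ["C"] then gd.modify "C" [] (fun l => l ++ [item.1])
  else if item.2 == ["D"] then gd.modify "D" [] (fun l => l ++ [item.1])
  else if item.2 == ["F"] then gd.modify "F" [] (fun l => l ++ [item.1])
  else gd

def distribute (S : List (String × List String)) : List (String × List String) :=
  let gd : PySem.Dict String (List String) := PySem.Dict.empty
  let gd := gd.insert "A" []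
  let gd := gd.insert "B" []
  let gd := gd.insert "C" []
  let gd := gd.insert "D" []
  let gd := gd.insert "F" []
  let gd := S.foldl distStep gd
  gd.items

-- ===== PORT B =====
def distribute_alt (S : List (String × List String)) : List (String × List String) :=
  ["A", "B", "C", "D", "F"].map (fun g => (g, (S.filter (fun kv => kv.2 == [g])).map (·.1)))

-- ===== PRECONDITION & SPEC =====
def Spec_distribute (S : List (String × List String)) (out : List (String × List String)) : Prop := out = distribute_alt S
instance (S : List (String × List String)) (out : List (String × List String)) : Decidable (Spec_distribute S out) := by unfold Spec_distribute; infer_instance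

-- ===== CLAIM (what is proved, stated in full; the proofs are below) =====
def Claim_equal_distribute : Prop := ∀ (S : List (String × List String)), Dom_distribute S → Spec_distribute S (distribute S)

-- ===== LEMMAS AND PROOFS =====

def distFilt (g : String) (S : List (String × List String)) : List String :=
  (S.filter (fun kv => kv.2 == [g])).map (·.1)

theorem distFilt_cons (g : String) (p : String × List String) (S : List (String × List String)) :
    distFilt g (p :: S) = (if p.2 == [g] then [p.1] else []) ++ distFilt g S := by
  cases h : p.2 == [g] <;> simp [distFilt, h]

theorem fold_items (S : List (String × List String)) (a b c d f : List String) :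
    (S.foldl distStep (PySem.Dict.mk [("A", a), ("B", b), ("C", c), ("D", d), ("F", f)])).items
      = [("A", a ++ distFilt "A" S), ("B", b ++ distFilt "B" S), ("C", c ++ distFilt "C" S),
         ("D", d ++ distFilt "D" S), ("F", f ++ distFilt "F" S)] := by
  induction S generalizing a b c d f with
  | nil => simp [distFilt]
  | cons p S ih =>
    rw [List.foldl_cons]
    by_cases hA : (p.2 == ["A"]) = true
    · have hstep : distStep (PySem.Dict.mk [("A", a), ("B", b), ("C", c), ("D", d), ("F", f)]) p
          = PySem.Dict.mk [("A", a ++ [p.1]), ("B", b), ("C", c), ("D", d), ("F", f)] := by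
        simp [distStep, hA, PySem.Dict.modify, PySem.Dict.insert, PySem.Dict.getD,
          PySem.Dict.get?, PySem.Dict.contains]
      have he : p.2 = ["A"] := by simpa using hA
      rw [hstep, ih]
      simp [distFilt_cons, he]
    · by_cases hB : (p.2 == ["B"]) = true
      · have hstep : distStep (PySem.Dict.mk [("A", a), ("B", b), ("C", c), ("D", d), ("F", f)]) p
            = PySem.Dict.mk [("A", a), ("B", b ++ [p.1]), ("C", c), ("D", d), ("F", f)] := by
          simp [distStep, hA, hB, PySem.Dict.modify, PySem.Dict.insert, PySem.Dict.getD,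
            PySem.Dict.get?, PySem.Dict.contains]
        have he : p.2 = ["B"] := by simpa using hB
        rw [hstep, ih]
        simp [distFilt_cons, he]
      · by_cases hC : (p.2 == ["C"]) = true
        · have hstep : distStep (PySem.Dict.mk [("A", a), ("B", b), ("C", c), ("D", d), ("F", f)]) p
              = PySem.Dict.mk [("A", a), ("B", b), ("C", c ++ [p.1]), ("D", d), ("F", f)] := by
            simp [distStep, hA, hB, hC, PySem.Dict.modify, PySem.Dict.insert, PySem.Dict.getD,
              PySem.Dict.get?, PySem.Dict.contains]
          have he : p.2 = ["C"] := by simpa using hC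
          rw [hstep, ih]
          simp [distFilt_cons, he]
        · by_cases hD : (p.2 == ["D"]) = true
          · have hstep : distStep (PySem.Dict.mk [("A", a), ("B", b), ("C", c), ("D", d), ("F", f)]) p
                = PySem.Dict.mk [("A", a), ("B", b), ("C", c), ("D", d ++ [p.1]), ("F", f)] := by
              simp [distStep, hA, hB, hC, hD, PySem.Dict.modify, PySem.Dict.insert, PySem.Dict.getD,
                PySem.Dict.get?, PySem.Dict.contains]
            have he : p.2 = ["D"] := by simpa using hD
            rw [hstep, ih]
            simp [distFilt_cons, he]
          · by_cases hF : (p.2 == ["F"]) = true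
            · have hstep : distStep (PySem.Dict.mk [("A", a), ("B", b), ("C", c), ("D", d), ("F", f)]) p
                  = PySem.Dict.mk [("A", a), ("B", b), ("C", c), ("D", d), ("F", f ++ [p.1])] := by
                simp [distStep, hA, hB, hC, hD, hF, PySem.Dict.modify, PySem.Dict.insert, PySem.Dict.getD,
                  PySem.Dict.get?, PySem.Dict.contains]
              have he : p.2 = ["F"] := by simpa using hF
              rw [hstep, ih]
              simp [distFilt_cons, he]
            · have hstep : distStep (PySem.Dict.mk [("A", a), ("B", b), ("C", c), ("D", d), ("F", f)]) p
                  = PySem.Dict.mk [("A", a), ("B", b), ("C", c), ("D", d), ("F", f)] := by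
                simp [distStep, hA, hB, hC, hD, hF]
              rw [hstep, ih]
              simp [distFilt_cons, hA, hB, hC, hD, hF]

-- ===== VERDICT (by name: the statement is the Claim_ definition above) =====
theorem distribute_spec : Claim_equal_distribute := by
  intro S _
  unfold Spec_distribute distribute distribute_alt
  show (S.foldl distStep (((((PySem.Dict.empty.insert "A" []).insert "B" []).insert "C" []).insert "D" []).insert "F" [])).items = _
  have hinit : ((((PySem.Dict.empty.insert "A" []).insert "B" []).insert "C" []).insert "D" []).insert "F" ([] : List String)
      = PySem.Dict.mk [("A", []), ("B", []), ("C", []), ("D", []), ("F", [])] := by decide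
  rw [hinit, fold_items]
  simp [distFilt]
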